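-- pv_equiv track=rewrite | github.com/Lutakite/YandexTrainings | 3_0/A/20.py | add2maxheap
-- ===== SOURCE A (Python) =====
-- def add2maxheap(heap, x, car, carsplaynextind):
--     heap.append((x, car))
--     i = len(heap) - 1
--     carsplaynextind[car] = i
--     while i//2 > 0 and heap[i // 2][0] < x:
--         heap[i//2], heap[i] = heap[i], heap[i//2]
--         carsplaynextind[heap[i//2][1]] = i//2
--         carsplaynextind[heap[i][1]] = i
--         i = i//2
--     return heap, carsplaynextind
-- ===== SOURCE B (Python) =====
-- # Two-phase insert: phase 1 is a read-only scan that lists the ancestor path of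
-- # the new slot and keeps the prefix of ancestors whose keys are below x; phase 2
-- # batch-shifts exactly those ancestors one level down and places the new pair at
-- # the last chain position.  Like A, mutates heap and carsplaynextind in place.
-- def add2maxheap(heap, x, car, carsplaynextind):
--     heap.append((x, car))
--     n = len(heap) - 1
--     carsplaynextind[car] = n
--     # Phase 1 (read-only): ancestor path of slot n, nearest first,
--     # then the prefix of ancestors smaller than x.
--     path = []
--     k = n
--     while k // 2 > 0:
--         path.append(k // 2)
--         k //= 2
--     moved = []
--     for p in path:
--         if heap[p][0] < x:
--             moved.append(p)
--         else:
--             break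
--     # Phase 2: each displaced ancestor drops to its child on the chain;
--     # the inserted pair lands at the final chain position.
--     chain = [n] + moved
--     for child, parent in zip(chain, moved):
--         heap[child] = heap[parent]
--         carsplaynextind[heap[child][1]] = child
--     dest = chain[-1]
--     heap[dest] = (x, car)
--     carsplaynextind[car] = dest
--     return heap, carsplaynextind
-- ===== Notes on version B (the rewrite author's own statement) =====
-- stated objective: alternative
-- what changed: A's single destructive pass (swap the new pair up level by level, two index-map writes per level) is replaced by a two-phase algorithm: a read-only pass first computes the ancestor path and the prefix of ancestors below x, then a batch pass shifts exactly those ancestors down their chain and writes the inserted pair and its map entry once at the precomputed destination.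
import Mathlib
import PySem

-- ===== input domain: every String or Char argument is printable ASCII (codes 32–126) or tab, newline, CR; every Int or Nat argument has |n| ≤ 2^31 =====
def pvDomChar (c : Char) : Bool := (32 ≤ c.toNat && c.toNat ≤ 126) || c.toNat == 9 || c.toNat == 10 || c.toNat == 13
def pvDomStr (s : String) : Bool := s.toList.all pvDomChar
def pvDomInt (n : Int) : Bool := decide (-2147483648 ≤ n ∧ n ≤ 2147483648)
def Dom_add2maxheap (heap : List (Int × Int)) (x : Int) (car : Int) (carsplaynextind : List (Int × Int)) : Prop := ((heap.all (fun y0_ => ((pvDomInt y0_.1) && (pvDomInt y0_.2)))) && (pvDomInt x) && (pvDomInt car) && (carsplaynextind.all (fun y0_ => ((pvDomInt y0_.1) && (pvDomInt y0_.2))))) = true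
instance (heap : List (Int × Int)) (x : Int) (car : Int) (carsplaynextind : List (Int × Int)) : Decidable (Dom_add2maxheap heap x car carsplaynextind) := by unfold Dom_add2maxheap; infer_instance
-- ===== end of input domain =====

-- B replaces A's destructive swap-up pass by a two-phase algorithm (read-only scan of the
-- ancestor path, then a batch shift of the displaced prefix); equivalence is about the
-- RETURN value (both Pythons also mutate their two arguments in place alike).

-- ===== PORT A =====
-- A's while loop: i//2 > 0 and heap[i//2][0] < x; swap heap[i//2]/heap[i], then update the
-- index map from the post-swap list.  In Python i = len(heap)-1 ≥ 0 and only shrinks by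
-- floor halving, so a Nat loop index with Nat division is exact; indices are always in
-- range, so List.getD's default is never read.
def aLoop (x : Int) (heap : List (Int × Int)) (d : PySem.Dict Int Int) (i : Nat) :
    List (Int × Int) × PySem.Dict Int Int :=
  if h : i / 2 > 0 ∧ (heap.getD (i / 2) (0, 0)).1 < x then
    let hi := heap.getD i (0, 0)
    let hp := heap.getD (i / 2) (0, 0)
    let heap' := (heap.set (i / 2) hi).set i hp
    let d' := (d.insert (heap'.getD (i / 2) (0, 0)).2 ((i / 2 : Nat) : Int)).insert
                (heap'.getD i (0, 0)).2 ((i : Nat) : Int)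
    aLoop x heap' d' (i / 2)
  else (heap, d)
termination_by i
decreasing_by omega

def add2maxheap (heap : List (Int × Int)) (x : Int) (car : Int) (carsplaynextind : List (Int × Int)) : (List (Int × Int)) × (List (Int × Int)) :=
  let heap1 := heap ++ [(x, car)]
  let i := heap1.length - 1
  let d1 := (PySem.Dict.mk carsplaynextind).insert car ((i : Nat) : Int)
  let r := aLoop x heap1 d1 i
  (r.1, r.2.items)

-- ===== PORT B =====
-- Phase 1a of Source B: the ancestor path of slot k (k//2, k//4, …, nearest first).
def ancestors (k : Nat) : List Nat :=
  if h : k / 2 > 0 then k / 2 :: ancestors (k / 2) else []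
termination_by k
decreasing_by omega

-- Phase 1b of Source B: the prefix of the path whose keys are below x (for … break).
def takeMoved (heap : List (Int × Int)) (x : Int) : List Nat → List Nat
  | [] => []
  | p :: rest => if (heap.getD p (0, 0)).1 < x then p :: takeMoved heap x rest else []

-- Phase 2 of Source B: for child, parent in pairs: heap[child] = heap[parent];
-- carsplaynextind[heap[child][1]] = child.
def applyMoves : List (Nat × Nat) → List (Int × Int) × PySem.Dict Int Int → List (Int × Int) × PySem.Dict Int Int
  | [], st => st
  | (c, p) :: rest, (h, d) =>
      applyMoves rest (h.set c (h.getD p (0, 0)), d.insert (h.getD p (0, 0)).2 ((c : Nat) : Int))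

def add2maxheap_alt (heap : List (Int × Int)) (x : Int) (car : Int) (carsplaynextind : List (Int × Int)) : (List (Int × Int)) × (List (Int × Int)) :=
  let heap1 := heap ++ [(x, car)]
  let n := heap1.length - 1
  let d1 := (PySem.Dict.mk carsplaynextind).insert car ((n : Nat) : Int)
  let moved := takeMoved heap1 x (ancestors n)
  let chain := n :: moved
  let r := applyMoves (chain.zip moved) (heap1, d1)
  let dest := chain.getLastD 0
  (r.1.set dest (x, car), (r.2.insert car ((dest : Nat) : Int)).items)

-- ===== PRECONDITION & SPEC =====
-- Pre_ excludes inputs where the inserted car already occurs as the car field of a heap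
-- element: there the final index-map entry for that duplicated car is an accidental
-- last-dict-write artefact of A's swap order, a corner no caller of this heap would specify.
def Pre_add2maxheap (heap : List (Int × Int)) (x : Int) (car : Int) (carsplaynextind : List (Int × Int)) : Prop :=
  car ∉ heap.map Prod.snd
instance (heap : List (Int × Int)) (x : Int) (car : Int) (carsplaynextind : List (Int × Int)) : Decidable (Pre_add2maxheap heap x car carsplaynextind) := by unfold Pre_add2maxheap; infer_instance

def pvWitness_add2maxheap : (List (Int × Int)) × Int × Int × (List (Int × Int)) :=
  ([(5, 1), (3, 2)], 4, 7, [(1, 1), (2, 2)])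

def Spec_add2maxheap (heap : List (Int × Int)) (x : Int) (car : Int) (carsplaynextind : List (Int × Int)) (out : (List (Int × Int)) × (List (Int × Int))) : Prop := out = add2maxheap_alt heap x car carsplaynextind
instance (heap : List (Int × Int)) (x : Int) (car : Int) (carsplaynextind : List (Int × Int)) (out : (List (Int × Int)) × (List (Int × Int))) : Decidable (Spec_add2maxheap heap x car carsplaynextind out) := by unfold Spec_add2maxheap; infer_instance

-- ===== CLAIM (what is proved, stated in full; the proofs are below) =====
def Claim_equal_add2maxheap : Prop := ∀ (heap : List (Int × Int)) (x : Int) (car : Int) (carsplaynextind : List (Int × Int)), Dom_add2maxheap heap x car carsplaynextind → Pre_add2maxheap heap x car carsplaynextind → Spec_add2maxheap heap x car carsplaynextind (add2maxheap heap x car carsplaynextind)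

-- ===== LEMMAS AND PROOFS =====

-- Proof-only intermediate: a hole-based sift-up loop; A is reduced to it, and B's staged
-- computation is shown to equal it.
def bLoop (x : Int) (heap : List (Int × Int)) (d : PySem.Dict Int Int) (i : Nat) :
    List (Int × Int) × PySem.Dict Int Int × Nat :=
  if h : i / 2 > 0 ∧ (heap.getD (i / 2) (0, 0)).1 < x then
    let parent := heap.getD (i / 2) (0, 0)
    bLoop x (heap.set i parent) (d.insert parent.2 ((i : Nat) : Int)) (i / 2)
  else (heap, d, i)
termination_by i
decreasing_by omega

theorem getD_set_ne (l : List (Int × Int)) (n m : Nat) (a d : Int × Int) (h : m ≠ n) :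
    (l.set n a).getD m d = l.getD m d := by
  simp [List.getD]; rw [List.getElem?_set_ne h.symm]

theorem getD_set_self (l : List (Int × Int)) (n : Nat) (a d : Int × Int) (h : n < l.length) :
    (l.set n a).getD n d = a := by
  simp [List.getD, h]

theorem getD_append_left (l l' : List (Int × Int)) (j : Nat) (d : Int × Int) (h : j < l.length) :
    (l ++ l').getD j d = l.getD j d := by
  simp [List.getD, List.getElem?_append_left h]

theorem set_append_last (l : List (Int × Int)) (a : Int × Int) :
    (l ++ [a]).set l.length a = l ++ [a] := by
  induction l with
  | nil => rfl
  | cons b t ih => simp only [List.cons_append, List.length_cons, List.set_cons_succ, ih]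

theorem dict_insert_comm (d : PySem.Dict Int Int) (k k' v v' : Int) (hne : k' ≠ k)
    (hk : d.contains k = true) :
    (d.insert k v).insert k' v' = (d.insert k' v').insert k v := by
  have hkk' : (k == k') = false := by simp; exact fun h => hne h.symm
  have hk'k : (k' == k) = false := by simp [hne]
  apply PySem.Dict.ext
  by_cases hc : d.contains k' = true
  · have h1 : (d.insert k v).contains k' = true := by
      rw [PySem.Dict.contains_insert, hc, Bool.or_true]
    have h2 : (d.insert k' v').contains k = true := by
      rw [PySem.Dict.contains_insert, hk, Bool.or_true]
    rw [PySem.Dict.items_insert_of_contains _ _ h1, PySem.Dict.items_insert_of_contains _ _ hk,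
        PySem.Dict.items_insert_of_contains _ _ h2, PySem.Dict.items_insert_of_contains _ _ hc,
        List.map_map, List.map_map]
    refine List.map_congr_left (fun p _ => ?_)
    rcases p with ⟨pk, pv⟩
    by_cases h3 : pk = k <;> by_cases h4 : pk = k' <;>
      simp_all [beq_iff_eq]
  · have hc' : d.contains k' = false := by simpa using hc
    have h1 : (d.insert k v).contains k' = false := by
      rw [PySem.Dict.contains_insert, hc', hk'k, Bool.or_false]
    have h2 : (d.insert k' v').contains k = true := by
      rw [PySem.Dict.contains_insert, hk, Bool.or_true]
    rw [PySem.Dict.items_insert_of_not_contains _ _ h1, PySem.Dict.items_insert_of_contains _ _ hk,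
        PySem.Dict.items_insert_of_contains _ _ h2, PySem.Dict.items_insert_of_not_contains _ _ hc',
        List.map_append]
    simp
    exact fun h => absurd h hne

theorem loop_eq (x car : Int) (L : List (Int × Int)) :
    ∀ i (heapA heapB : List (Int × Int)) (dA dB : PySem.Dict Int Int),
      i < L.length →
      heapA = heapB.set i (x, car) →
      heapB.length = L.length →
      (∀ j, j < i → heapB.getD j (0, 0) = L.getD j (0, 0)) →
      (∀ j, j < L.length - 1 → (L.getD j (0, 0)).2 ≠ car) →
      dA = dB.insert car ((i : Nat) : Int) →
      dB.contains car = true →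
      aLoop x heapA dA i =
        ((bLoop x heapB dB i).1.set (bLoop x heapB dB i).2.2 (x, car),
         (bLoop x heapB dB i).2.1.insert car (((bLoop x heapB dB i).2.2 : Nat) : Int)) := by
  intro i
  induction i using Nat.strong_induction_on with
  | _ i IH =>
  intro heapA heapB dA dB hiL hA hlen hjB hLcar hdA hdB
  by_cases hg : i / 2 > 0 ∧ (heapB.getD (i / 2) (0, 0)).1 < x
  · have h2 : 2 ≤ i := by omega
    have hne : i / 2 ≠ i := by omega
    have hgB : heapA.getD (i / 2) (0, 0) = heapB.getD (i / 2) (0, 0) := by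
      rw [hA]; exact getD_set_ne _ _ _ _ _ hne
    have hgA : i / 2 > 0 ∧ (heapA.getD (i / 2) (0, 0)).1 < x := ⟨hg.1, by rw [hgB]; exact hg.2⟩
    have hiB : i < heapB.length := by omega
    have hhiA : heapA.getD i (0, 0) = (x, car) := by rw [hA]; exact getD_set_self _ _ _ _ hiB
    have hpL : heapB.getD (i / 2) (0, 0) = L.getD (i / 2) (0, 0) := hjB _ (by omega)
    have hp2car : (heapB.getD (i / 2) (0, 0)).2 ≠ car := by
      rw [hpL]; exact hLcar _ (by omega)
    rw [aLoop, bLoop, dif_pos hgA, dif_pos hg]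
    simp only []
    -- new A-side heap equals new B-side heap with the hole at i/2 re-filled by (x, car)
    have hheap : (heapA.set (i / 2) (heapA.getD i (0, 0))).set i (heapA.getD (i / 2) (0, 0)) =
        (heapB.set i (heapB.getD (i / 2) (0, 0))).set (i / 2) (x, car) := by
      rw [hhiA, hgB, hA, List.set_comm _ _ hne, List.set_set, ← List.set_comm _ _ hne]
    -- the two index-map writes of A collapse onto B's one write plus the deferred car write
    have hdict :
        (dA.insert (((heapA.set (i / 2) (heapA.getD i (0, 0))).set i
              (heapA.getD (i / 2) (0, 0))).getD (i / 2) (0, 0)).2 ((i / 2 : Nat) : Int)).insert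
            (((heapA.set (i / 2) (heapA.getD i (0, 0))).set i
              (heapA.getD (i / 2) (0, 0))).getD i (0, 0)).2 ((i : Nat) : Int) =
          (dB.insert (heapB.getD (i / 2) (0, 0)).2 ((i : Nat) : Int)).insert car
            ((i / 2 : Nat) : Int) := by
      have e1 : ((heapA.set (i / 2) (heapA.getD i (0, 0))).set i
          (heapA.getD (i / 2) (0, 0))).getD (i / 2) (0, 0) = (x, car) := by
        rw [hheap]; exact getD_set_self _ _ _ _ (by simp; omega)
      have e2 : ((heapA.set (i / 2) (heapA.getD i (0, 0))).set i
          (heapA.getD (i / 2) (0, 0))).getD i (0, 0) = heapB.getD (i / 2) (0, 0) := by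
        rw [getD_set_self _ _ _ _ (by simp [hA]; omega), hgB]
      rw [e1, e2, hdA, PySem.Dict.insert_insert_self,
          dict_insert_comm dB car (heapB.getD (i / 2) (0, 0)).2 _ _ hp2car hdB]
    rw [hdict, hheap]
    exact IH (i / 2) (by omega) _ _ _ _ (by omega) rfl (by simp [hlen])
      (fun j hj => by rw [getD_set_ne _ _ _ _ _ (by omega)]; exact hjB j (by omega)) hLcar rfl
      (by rw [PySem.Dict.contains_insert, hdB, Bool.or_true])
  · have hgA : ¬(i / 2 > 0 ∧ (heapA.getD (i / 2) (0, 0)).1 < x) := by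
      intro hc
      have hne : i / 2 ≠ i := by omega
      exact hg ⟨hc.1, by rw [← getD_set_ne heapB i (i / 2) (x, car) (0, 0) hne, ← hA]; exact hc.2⟩
    rw [aLoop, bLoop, dif_neg hgA, dif_neg hg]
    rw [hA, hdA]

-- every index on the ancestor path of k is positive and at most k/2
theorem ancestors_mem (k : Nat) : ∀ j ∈ ancestors k, 0 < j ∧ j ≤ k / 2 := by
  induction k using Nat.strong_induction_on with
  | _ k IH =>
  intro j hj
  rw [ancestors] at hj
  by_cases h : k / 2 > 0
  · rw [dif_pos h] at hj
    rcases List.mem_cons.mp hj with h1 | h1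
    · omega
    · have := IH (k / 2) (by omega) j h1
      omega
  · rw [dif_neg h] at hj; cases hj

-- takeMoved only reads indices on the path, so a write outside the path is invisible
theorem takeMoved_set (heap : List (Int × Int)) (x : Int) (i : Nat) (v : Int × Int)
    (path : List Nat) (h : ∀ j ∈ path, j ≠ i) :
    takeMoved (heap.set i v) x path = takeMoved heap x path := by
  induction path with
  | nil => rfl
  | cons p rest ih =>
    simp only [takeMoved, getD_set_ne heap i p v (0, 0) (h p (List.mem_cons_self))]
    rw [ih (fun j hj => h j (List.mem_cons_of_mem _ hj))]

-- B's staged computation (prefix of the ancestor path, then the batch of moves)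
-- performs exactly the hole-based sift-up
theorem staged_eq_hole (x : Int) : ∀ (i : Nat) (heap : List (Int × Int)) (d : PySem.Dict Int Int),
    bLoop x heap d i =
      ((applyMoves ((i :: takeMoved heap x (ancestors i)).zip (takeMoved heap x (ancestors i))) (heap, d)).1,
       (applyMoves ((i :: takeMoved heap x (ancestors i)).zip (takeMoved heap x (ancestors i))) (heap, d)).2,
       (i :: takeMoved heap x (ancestors i)).getLastD 0) := by
  intro i
  induction i using Nat.strong_induction_on with
  | _ i IH =>
  intro heap d
  by_cases hg : i / 2 > 0 ∧ (heap.getD (i / 2) (0, 0)).1 < x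
  · have hanc : ancestors i = i / 2 :: ancestors (i / 2) := by rw [ancestors, dif_pos hg.1]
    have hmov : takeMoved heap x (ancestors i) = i / 2 :: takeMoved heap x (ancestors (i / 2)) := by
      rw [hanc, takeMoved, if_pos hg.2]
    have hset : takeMoved (heap.set i (heap.getD (i / 2) (0, 0))) x (ancestors (i / 2)) =
        takeMoved heap x (ancestors (i / 2)) := by
      refine takeMoved_set _ _ _ _ _ (fun j hj => ?_)
      have := ancestors_mem (i / 2) j hj
      omega
    rw [bLoop, dif_pos hg, hmov]
    simp only [List.zip_cons_cons, applyMoves]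
    rw [IH (i / 2) (by omega) _ _, hset]
    simp [List.getLastD]
  · rw [bLoop, dif_neg hg]
    have hmov : takeMoved heap x (ancestors i) = [] := by
      rw [ancestors]
      by_cases h : i / 2 > 0
      · rw [dif_pos h, takeMoved, if_neg (fun hc => hg ⟨h, hc⟩)]
      · rw [dif_neg h]; rfl
    rw [hmov]
    simp [applyMoves, List.getLastD]

-- ===== VERDICT (by name: the statement is the Claim_ definition above) =====
theorem add2maxheap_spec : Claim_equal_add2maxheap := by
  intro heap x car d _hDom hPre
  show add2maxheap heap x car d = add2maxheap_alt heap x car d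
  simp only [add2maxheap, add2maxheap_alt]
  have hl : (heap ++ [(x, car)]).length - 1 = heap.length := by simp
  rw [hl]
  have hLcar : ∀ j, j < (heap ++ [(x, car)]).length - 1 →
      (((heap ++ [(x, car)]).getD j (0, 0)).2 ≠ car) := by
    intro j hj
    have hj' : j < heap.length := by simpa using hj
    rw [getD_append_left _ _ _ _ hj', List.getD_eq_getElem _ _ hj']
    intro hc
    exact hPre (List.mem_map.mpr ⟨heap[j], List.getElem_mem hj', hc⟩)
  have key := loop_eq x car (heap ++ [(x, car)]) heap.length
      (heap ++ [(x, car)]) (heap ++ [(x, car)])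
      ((PySem.Dict.mk d).insert car ((heap.length : Nat) : Int))
      ((PySem.Dict.mk d).insert car ((heap.length : Nat) : Int))
      (by simp) (set_append_last heap (x, car)).symm rfl (fun j _ => rfl) hLcar
      (PySem.Dict.insert_insert_self _ _ _ _).symm
      (PySem.Dict.contains_insert_self _ _ _)
  rw [key, staged_eq_hole x heap.length (heap ++ [(x, car)])
      ((PySem.Dict.mk d).insert car ((heap.length : Nat) : Int))]
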